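-- pv_equiv track=rewrite | github.com/RyanKHawkins/CryptoWizard | keyword_shift.py | set_keyword_shift
-- ===== SOURCE A (Python) =====
-- alphabet = 'abcdefghijklmnopqrstuvwxyz'
--
-- def set_keyword_shift(keyword):
--     shifted_alphabet = ""
--     for char in keyword:
--         if char in alphabet:
--             if not char in shifted_alphabet:
--                 shifted_alphabet += char
--
--     for letter in alphabet:
--         if not letter in shifted_alphabet:
--             shifted_alphabet += letter
--     return shifted_alphabet
-- ===== SOURCE B (Python) =====
-- alphabet = 'abcdefghijklmnopqrstuvwxyz'
--
-- def set_keyword_shift(keyword):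
--     order = keyword + alphabet
--     return ''.join(sorted(alphabet, key=order.find))
-- ===== Notes on version B (the rewrite author's own statement) =====
-- stated objective: alternative
-- what changed: Instead of building the result with two appending loops that test membership against the growing string, B sorts the 26 alphabet letters by their first-occurrence index in keyword+alphabet (a stable key sort); no dedup or growing accumulator exists in B.
import Mathlib
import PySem

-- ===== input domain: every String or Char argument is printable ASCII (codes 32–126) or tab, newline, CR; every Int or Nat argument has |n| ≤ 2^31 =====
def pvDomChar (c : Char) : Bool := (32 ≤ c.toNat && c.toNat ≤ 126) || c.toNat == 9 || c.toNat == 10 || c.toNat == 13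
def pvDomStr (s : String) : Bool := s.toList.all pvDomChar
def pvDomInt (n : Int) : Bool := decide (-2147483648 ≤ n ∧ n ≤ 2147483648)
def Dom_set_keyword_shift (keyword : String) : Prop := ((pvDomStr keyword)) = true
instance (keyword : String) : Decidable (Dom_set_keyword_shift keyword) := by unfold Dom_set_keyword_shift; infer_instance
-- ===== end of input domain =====

-- B replaces A's two accumulator loops by a stable sort of the 26 alphabet letters,
-- keyed by first occurrence in keyword+alphabet (objective: alternative).

-- the module constant `alphabet` (single chars; `char in alphabet` on a 1-char string is char membership, exact)
def pyAlphabet : List Char := "abcdefghijklmnopqrstuvwxyz".toList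

-- ===== PORT A =====
def set_keyword_shift (keyword : String) : String :=
  let s1 : List Char := keyword.toList.foldl
    (fun shifted c => if c ∈ pyAlphabet then (if c ∉ shifted then shifted ++ [c] else shifted) else shifted) []
  let s2 : List Char := pyAlphabet.foldl
    (fun shifted l => if l ∉ shifted then shifted ++ [l] else shifted) s1
  String.ofList s2

-- ===== PORT B =====
def set_keyword_shift_alt (keyword : String) : String :=
  let order : List Char := keyword.toList ++ pyAlphabet        -- keyword + alphabet
  String.ofList (PySem.List.sorted pyAlphabet (fun c => PySem.Chars.find order [c]) false)

-- ===== PRECONDITION & SPEC =====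
def Spec_set_keyword_shift (keyword : String) (out : String) : Prop := out = set_keyword_shift_alt keyword
instance (keyword : String) (out : String) : Decidable (Spec_set_keyword_shift keyword out) := by unfold Spec_set_keyword_shift; infer_instance

-- ===== CLAIM (what is proved, stated in full; the proofs are below) =====
def Claim_equal_set_keyword_shift : Prop := ∀ (keyword : String), Dom_set_keyword_shift keyword → Spec_set_keyword_shift keyword (set_keyword_shift keyword)

-- ===== LEMMAS AND PROOFS =====

-- A's loop body "if not c in shifted: shifted += c" is exactly Python set-add on an ordered set
theorem pvStep_eq_add (s : List Char) (c : Char) :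
    (if c ∉ s then s ++ [c] else s) = PySem.Set.add s c := by
  simp [PySem.Set.add, PySem.Set.contains]

-- A's two membership loops compute the ordered dedup of (filtered keyword ++ alphabet)
theorem pvA_eq_dedup (l : List Char) :
    pyAlphabet.foldl (fun shifted c => if c ∉ shifted then shifted ++ [c] else shifted)
      (l.foldl (fun shifted c => if c ∈ pyAlphabet then (if c ∉ shifted then shifted ++ [c] else shifted) else shifted) []) =
    PySem.List.dedup (l.filter (fun c => decide (c ∈ pyAlphabet)) ++ pyAlphabet) := by
  simp only [pvStep_eq_add]
  rw [PySem.List.foldl_ite_eq_foldl_filter (p := fun c => c ∈ pyAlphabet)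
        (f := fun s c => PySem.Set.add s c)]
  rw [PySem.List.dedup_eq_ofList, PySem.Set.ofList_eq_foldl, List.foldl_append]

-- running the dedup fold from a seed s: the seed, then the fresh part of the clean dedup
theorem pvFoldl_add_seed (zs : List Char) : ∀ (s : List Char),
    zs.foldl PySem.Set.add s = s ++ (PySem.List.dedup zs).filter (fun y => decide (y ∉ s)) := by
  induction zs with
  | nil => intro s; simp [PySem.List.dedup, PySem.Set.ofList]
  | cons a zs ih =>
    intro s
    have hD : PySem.List.dedup (a :: zs) =
        a :: (PySem.List.dedup zs).filter (fun y => decide (y ∉ [a])) := by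
      simp only [PySem.List.dedup, PySem.Set.ofList, List.foldl_cons]
      have : PySem.Set.add (PySem.Set.empty) a = [a] := by
        simp [PySem.Set.add, PySem.Set.empty, PySem.Set.contains]
      rw [this, ih [a]]
      rfl
    rw [List.foldl_cons, ih (PySem.Set.add s a), hD, List.filter_cons, List.filter_filter]
    by_cases ha : a ∈ s
    · have hadd : PySem.Set.add s a = s := by
        simp [PySem.Set.add, PySem.Set.contains, ha]
      rw [hadd, decide_eq_false (show ¬ a ∉ s by simp [ha])]
      simp only [Bool.false_eq_true, if_false]
      congr 1
      apply List.filter_congr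
      intro y _
      by_cases hy : y ∈ s
      · simp [hy]
      · simp only [hy, not_false_eq_true, decide_true, Bool.true_and]
        have : y ≠ a := by rintro rfl; exact hy ha
        simp [this]
    · have hadd : PySem.Set.add s a = s ++ [a] := by
        simp [PySem.Set.add, PySem.Set.contains, ha]
      rw [hadd, decide_eq_true (show a ∉ s from ha), if_pos rfl, List.append_assoc,
        List.singleton_append]
      congr 2
      apply List.filter_congr
      intro y _
      by_cases hy1 : y ∈ s <;> by_cases hy2 : y = a <;>
        simp [hy1, hy2, List.mem_append]

-- first-occurrence dedup, structurally
theorem pvDedup_cons (a : Char) (zs : List Char) :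
    PySem.List.dedup (a :: zs) = a :: (PySem.List.dedup zs).filter (fun y => decide (y ≠ a)) := by
  simp only [PySem.List.dedup, PySem.Set.ofList, List.foldl_cons]
  have : PySem.Set.add (PySem.Set.empty) a = [a] := by
    simp [PySem.Set.add, PySem.Set.empty, PySem.Set.contains]
  rw [this, pvFoldl_add_seed zs [a]]
  simp [PySem.List.dedup, PySem.Set.ofList]

-- dedup commutes with filter
theorem pvDedup_filter (q : Char → Bool) (zs : List Char) :
    PySem.List.dedup (zs.filter q) = (PySem.List.dedup zs).filter q := by
  induction zs with
  | nil => rfl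
  | cons a zs ih =>
    rw [List.filter_cons, pvDedup_cons a zs, List.filter_cons]
    by_cases hq : q a = true
    · rw [if_pos hq, pvDedup_cons, ih, if_pos hq, List.filter_filter, List.filter_filter]
      congr 1
      apply List.filter_congr; intro y _
      by_cases hy : y = a <;> simp [hy, hq]
    · rw [if_neg hq, ih, if_neg hq, List.filter_filter]
      apply (List.filter_congr _).symm
      intro y _
      by_cases hy : y = a
      · subst hy; simp [hq]
      · simp [hy]

-- dedup lists its elements in order of first occurrence in the source
theorem pvDedup_pairwise_idxOf (zs : List Char) :
    (PySem.List.dedup zs).Pairwise (fun a b => zs.idxOf a < zs.idxOf b) := by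
  induction zs with
  | nil => exact List.Pairwise.nil
  | cons x zs ih =>
    rw [pvDedup_cons]
    constructor
    · intro b hb
      have hbx : b ≠ x := by simpa using List.of_mem_filter hb
      have hxb : (x == b) = false := by simp [Ne.symm hbx]
      simp [List.idxOf_cons, hxb]
    · have hp : ((PySem.List.dedup zs).filter (fun y => decide (y ≠ x))).Pairwise
          (fun a b => zs.idxOf a < zs.idxOf b) := ih.sublist List.filter_sublist
      apply hp.imp_of_mem
      intro a b ha hb hab
      have hax : (x == a) = false := by
        have : a ≠ x := by simpa using List.of_mem_filter ha
        simp [Ne.symm this]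
      have hbx : (x == b) = false := by
        have : b ≠ x := by simpa using List.of_mem_filter hb
        simp [Ne.symm this]
      simp only [List.idxOf_cons, hax, hbx, cond_false]
      omega

-- str.find for a single-character needle is the index of its first occurrence
theorem pvFind_go_single (c : Char) (zs : List Char) : ∀ (k : Nat), c ∈ zs →
    PySem.Chars.find.go [c] zs k = ((k : Int) + (zs.idxOf c : Int)) := by
  induction zs with
  | nil => intro k h; cases h
  | cons a zs ih =>
    intro k h
    by_cases hac : c = a
    · subst hac
      simp [PySem.Chars.find.go, List.isPrefixOf]
    · have hmem : c ∈ zs := by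
        rcases List.mem_cons.mp h with h1 | h1
        · exact absurd h1 hac
        · exact h1
      have hpre : [c].isPrefixOf (a :: zs) = false := by
        simp only [List.isPrefixOf, Bool.and_true, beq_eq_false_iff_ne, ne_eq]
        exact hac
      rw [PySem.Chars.find.go, hpre]
      simp only [Bool.false_eq_true, if_false]
      rw [ih (k + 1) hmem]
      have hne : (a == c) = false := by simp; exact fun h1 => hac h1.symm
      simp only [List.idxOf_cons, hne, cond_false]
      push_cast
      ring

theorem pvFind_single (c : Char) (zs : List Char) (h : c ∈ zs) :
    PySem.Chars.find zs [c] = (zs.idxOf c : Int) := by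
  unfold PySem.Chars.find
  rw [pvFind_go_single c zs 0 h]
  simp

-- alphabet facts
theorem pvAlpha_nodup : pyAlphabet.Nodup := by decide
theorem pvAlpha_filter_self : pyAlphabet.filter (fun c => decide (c ∈ pyAlphabet)) = pyAlphabet := by decide

-- A's result, characterised: the alphabet letters of keyword++alphabet, deduped by first occurrence
theorem pvA_char (l : List Char) :
    PySem.List.dedup (l.filter (fun c => decide (c ∈ pyAlphabet)) ++ pyAlphabet) =
    (PySem.List.dedup (l ++ pyAlphabet)).filter (fun c => decide (c ∈ pyAlphabet)) := by
  rw [← pvDedup_filter]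
  congr 1
  rw [List.filter_append, pvAlpha_filter_self]

-- ===== VERDICT (by name: the statement is the Claim_ definition above) =====
theorem set_keyword_shift_spec : Claim_equal_set_keyword_shift := by
  intro keyword _
  unfold Spec_set_keyword_shift set_keyword_shift set_keyword_shift_alt
  apply congrArg String.ofList
  rw [pvA_eq_dedup, pvA_char]
  set zs : List Char := keyword.toList ++ pyAlphabet with hzs
  set ys : List Char := (PySem.List.dedup zs).filter (fun c => decide (c ∈ pyAlphabet)) with hys
  have hmem_ys : ∀ c, c ∈ ys → c ∈ zs := by
    intro c hc
    exact (PySem.List.mem_dedup zs c).mp (List.mem_of_mem_filter hc)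
  have hperm : ys.Perm pyAlphabet := by
    rw [List.perm_ext_iff_of_nodup ((PySem.List.nodup_dedup zs).filter _) pvAlpha_nodup]
    intro c
    constructor
    · intro hc
      simpa using List.of_mem_filter hc
    · intro hc
      exact List.mem_filter.mpr
        ⟨(PySem.List.mem_dedup zs c).mpr (List.mem_append_right _ hc), by simpa using hc⟩
  have hpair : ys.Pairwise (fun a b =>
      PySem.Chars.find zs [a] < PySem.Chars.find zs [b]) := by
    have h0 : ys.Pairwise (fun a b => zs.idxOf a < zs.idxOf b) :=
      (pvDedup_pairwise_idxOf zs).sublist List.filter_sublist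
    apply h0.imp_of_mem
    intro a b ha hb hab
    rw [pvFind_single a zs (hmem_ys a ha), pvFind_single b zs (hmem_ys b hb)]
    exact_mod_cast hab
  exact (PySem.List.sorted_eq_of_perm_of_pairwise_lt pyAlphabet ys _ hperm hpair).symm
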